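-- pv_equiv track=rewrite | github.com/entrepidea/projects | python/prod/account/2019/Main.py | matched
-- ===== SOURCE A (Python) =====
-- def matched(debit_tups, ref_tups):
--     for item in debit_tups:
--         found = False
--         for ref in ref_tups:
--             if ref[0] in item[1]:
--                 found = True
--                 yield item + tuple([ref[1]])
--         if not found:
--             yield item + tuple(['misc'])
-- ===== SOURCE B (Python) =====
-- def matched(debit_tups, ref_tups):
--     # ref-major pass: for each ref, record its label against every debit item it matches;
--     # then emit rows in item order, 'misc' for items with no labels.
--     hits = [[] for _ in debit_tups]
--     for ref in ref_tups:
--         for labs, item in zip(hits, debit_tups):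
--             if ref[0] in item[1]:
--                 labs.append(ref[1])
--     for item, labs in zip(debit_tups, hits):
--         for lab in (labs or ('misc',)):
--             yield item + (lab,)
-- ===== Notes on version B (the rewrite author's own statement) =====
-- stated objective: alternative
-- what changed: Inverted the loop nesting: instead of A's item-major scan with a found flag, B makes one ref-major pass collecting per-item label lists, then emits rows in item order with 'misc' for empty lists.
import Mathlib
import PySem

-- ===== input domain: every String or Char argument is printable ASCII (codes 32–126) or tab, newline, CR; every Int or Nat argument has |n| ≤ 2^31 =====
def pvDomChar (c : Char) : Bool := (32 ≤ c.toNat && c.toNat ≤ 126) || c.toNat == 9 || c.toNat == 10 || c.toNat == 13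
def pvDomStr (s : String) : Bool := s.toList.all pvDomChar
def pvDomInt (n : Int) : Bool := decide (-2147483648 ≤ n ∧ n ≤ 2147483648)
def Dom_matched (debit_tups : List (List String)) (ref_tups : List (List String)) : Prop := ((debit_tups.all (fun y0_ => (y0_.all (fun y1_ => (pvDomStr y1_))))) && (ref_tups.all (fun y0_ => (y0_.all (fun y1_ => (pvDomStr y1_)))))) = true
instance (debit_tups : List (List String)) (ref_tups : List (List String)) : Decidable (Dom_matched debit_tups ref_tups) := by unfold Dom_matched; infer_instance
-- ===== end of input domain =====

-- B inverts A's loop nesting: one ref-major pass collecting per-item label lists, then rows emitted in item order ('misc' when empty); equivalence of return values (both Pythons are generators).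


-- ===== PORT A =====
def matched (debit_tups : List (List String)) (ref_tups : List (List String)) : List (List String) :=
  debit_tups.foldl (fun acc item =>
    let st := ref_tups.foldl (fun (st : Bool × List (List String)) ref =>
        if PySem.Str.isIn (PySem.List.pyGetD ref 0 "") (PySem.List.pyGetD item 1 "") then
          (true, st.2 ++ [item ++ [PySem.List.pyGetD ref 1 ""]])
        else st) (false, acc)
    if st.1 then st.2 else st.2 ++ [item ++ ["misc"]]) []

-- ===== PORT B =====
def matched_alt (debit_tups : List (List String)) (ref_tups : List (List String)) : List (List String) :=
  let hits := ref_tups.foldl (fun hits ref =>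
      List.zipWith (fun labs item =>
          if PySem.Str.isIn (PySem.List.pyGetD ref 0 "") (PySem.List.pyGetD item 1 "") then
            labs ++ [PySem.List.pyGetD ref 1 ""]
          else labs) hits debit_tups)
    (debit_tups.map (fun _ => ([] : List String)))
  (debit_tups.zip hits).foldl (fun acc p =>
    acc ++ (if p.2 = [] then ["misc"] else p.2).map (fun lab => p.1 ++ [lab])) []

-- ===== PRECONDITION & SPEC =====
-- Pre_ admits exactly the inputs on which A returns normally: outside it A raises IndexError
-- (a debit tuple without a second field scanned against a nonempty ref list, an empty ref tuple,
-- or a 1-field ref tuple whose pattern matches some item so ref[1] is read); B raises there too.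
def Pre_matched (debit_tups : List (List String)) (ref_tups : List (List String)) : Prop :=
  debit_tups = [] ∨ ref_tups = [] ∨
  ((∀ item ∈ debit_tups, 2 ≤ item.length) ∧
   (∀ ref ∈ ref_tups, 1 ≤ ref.length ∧
      ((∃ item ∈ debit_tups,
          PySem.Str.isIn (PySem.List.pyGetD ref 0 "") (PySem.List.pyGetD item 1 "") = true) →
        2 ≤ ref.length)))
instance (debit_tups : List (List String)) (ref_tups : List (List String)) : Decidable (Pre_matched debit_tups ref_tups) := by unfold Pre_matched; infer_instance

def pvWitness_matched : List (List String) × List (List String) :=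
  ([["d1", "abc"], ["d2", "xyz"]], [["b", "books"], ["y", "toys"]])

def Spec_matched (debit_tups : List (List String)) (ref_tups : List (List String)) (out : List (List String)) : Prop := out = matched_alt debit_tups ref_tups
instance (debit_tups : List (List String)) (ref_tups : List (List String)) (out : List (List String)) : Decidable (Spec_matched debit_tups ref_tups out) := by unfold Spec_matched; infer_instance

-- ===== CLAIM (what is proved, stated in full; the proofs are below) =====
def Claim_equal_matched : Prop := ∀ (debit_tups : List (List String)) (ref_tups : List (List String)), Dom_matched debit_tups ref_tups → Pre_matched debit_tups ref_tups → Spec_matched debit_tups ref_tups (matched debit_tups ref_tups)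

-- ===== LEMMAS AND PROOFS =====

-- the match predicate and per-ref label shared by both characterisations
def pvP (item ref : List String) : Bool :=
  PySem.Str.isIn (PySem.List.pyGetD ref 0 "") (PySem.List.pyGetD item 1 "")
def pvLab (ref : List String) : String := PySem.List.pyGetD ref 1 ""

-- the rows A emits for one item / the rows B emits for one item
def pvBlockA (refs : List (List String)) (item : List String) : List (List String) :=
  if refs.any (pvP item) then (refs.filter (pvP item)).map (fun ref => item ++ [pvLab ref])
  else [item ++ ["misc"]]
def pvBlockB (refs : List (List String)) (item : List String) : List (List String) :=
  (if (refs.filter (pvP item)).map pvLab = [] then ["misc"] else (refs.filter (pvP item)).map pvLab).map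
    (fun lab => item ++ [lab])

-- generic: a foldl that appends a block per element is init ++ flatMap
theorem pv_foldl_app {α β : Type} (h : α → List β) :
    ∀ (l : List α) (init : List β),
      l.foldl (fun acc x => acc ++ h x) init = init ++ l.flatMap h := by
  intro l
  induction l with
  | nil => intro init; simp
  | cons x xs ih => intro init; simp [List.foldl_cons, ih]

theorem pv_not_any (item : List String) {refs : List (List String)}
    (h : ¬ refs.any (pvP item) = true) : refs.filter (pvP item) = [] := by
  rw [List.filter_eq_nil_iff]
  intro r hr hp
  exact h (List.any_eq_true.2 ⟨r, hr, hp⟩)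

-- A's inner loop over refs: found flag = any match, acc extended by one row per matching ref
theorem pv_innerA (item : List String) :
    ∀ (refs : List (List String)) (b : Bool) (acc : List (List String)),
      refs.foldl (fun (st : Bool × List (List String)) ref =>
          if PySem.Str.isIn (PySem.List.pyGetD ref 0 "") (PySem.List.pyGetD item 1 "") then
            (true, st.2 ++ [item ++ [PySem.List.pyGetD ref 1 ""]])
          else st) (b, acc)
        = (b || refs.any (pvP item),
           acc ++ (refs.filter (pvP item)).map (fun ref => item ++ [pvLab ref])) := by
  intro refs
  induction refs with
  | nil => intro b acc; simp
  | cons r rs ih =>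
    intro b acc
    rw [List.foldl_cons]
    by_cases h : PySem.Str.isIn (PySem.List.pyGetD r 0 "") (PySem.List.pyGetD item 1 "") = true
    · rw [if_pos h, ih]
      have hp : pvP item r = true := h
      simp [hp, pvLab]
    · rw [if_neg h, ih]
      have hp : pvP item r = false := by
        unfold pvP; revert h; cases PySem.Str.isIn (PySem.List.pyGetD r 0 "") (PySem.List.pyGetD item 1 "") <;> simp
      simp [hp]

-- A is the flatMap of its per-item blocks
theorem pv_A_flat (ref_tups : List (List String)) :
    ∀ (d : List (List String)) (acc : List (List String)),
      d.foldl (fun acc item =>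
        let st := ref_tups.foldl (fun (st : Bool × List (List String)) ref =>
            if PySem.Str.isIn (PySem.List.pyGetD ref 0 "") (PySem.List.pyGetD item 1 "") then
              (true, st.2 ++ [item ++ [PySem.List.pyGetD ref 1 ""]])
            else st) (false, acc)
        if st.1 then st.2 else st.2 ++ [item ++ ["misc"]]) acc
      = acc ++ d.flatMap (pvBlockA ref_tups) := by
  intro d
  induction d with
  | nil => intro acc; simp
  | cons x xs ih =>
    intro acc
    simp only [List.foldl_cons, pv_innerA x ref_tups false acc, Bool.false_or]
    by_cases h : ref_tups.any (pvP x) = true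
    · rw [if_pos h, ih]
      simp [pvBlockA, h]
    · rw [if_neg h, ih]
      simp [pvBlockA, h, pv_not_any x h]

-- zipWith over (l.map f) and l is a map over l
theorem pv_zipWith_map {α β γ : Type} (g : β → α → γ) (f : α → β) :
    ∀ (l : List α), List.zipWith g (l.map f) l = l.map (fun x => g (f x) x) := by
  intro l; induction l with
  | nil => rfl
  | cons x xs ih => simp [ih]

-- l.zip (l.map f) = pairs (x, f x)
theorem pv_zip_map {α β : Type} (f : α → β) :
    ∀ (l : List α), l.zip (l.map f) = l.map (fun x => (x, f x)) := by
  intro l; induction l with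
  | nil => rfl
  | cons x xs ih => simp [ih]

-- B's ref-major pass: the hits list maps each item to its matched labels in ref order
theorem pv_hits (debit_tups : List (List String)) :
    ∀ (refs : List (List String)) (f : List String → List String),
      refs.foldl (fun hits ref =>
          List.zipWith (fun labs item =>
              if PySem.Str.isIn (PySem.List.pyGetD ref 0 "") (PySem.List.pyGetD item 1 "") then
                labs ++ [PySem.List.pyGetD ref 1 ""]
              else labs) hits debit_tups)
        (debit_tups.map f)
        = debit_tups.map (fun item => f item ++ (refs.filter (pvP item)).map pvLab) := by
  intro refs
  induction refs with
  | nil => intro f; simp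
  | cons r rs ih =>
    intro f
    rw [List.foldl_cons, pv_zipWith_map, ih]
    apply List.map_congr_left
    intro item _
    by_cases h : PySem.Str.isIn (PySem.List.pyGetD r 0 "") (PySem.List.pyGetD item 1 "") = true
    · have hp : pvP item r = true := h
      rw [if_pos h]
      simp [hp, pvLab]
    · have hp : pvP item r = false := by
        unfold pvP; revert h; cases PySem.Str.isIn (PySem.List.pyGetD r 0 "") (PySem.List.pyGetD item 1 "") <;> simp
      rw [if_neg h]
      simp [hp]

-- per item, A's rows equal B's rows
theorem pv_block (refs : List (List String)) (item : List String) :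
    pvBlockA refs item = pvBlockB refs item := by
  unfold pvBlockA pvBlockB
  by_cases h : refs.any (pvP item) = true
  · have hne : (refs.filter (pvP item)).map pvLab ≠ [] := by
      simp only [ne_eq, List.map_eq_nil_iff, List.filter_eq_nil_iff]
      intro hall
      obtain ⟨r, hr, hp⟩ := List.any_eq_true.1 h
      exact hall r hr hp
    rw [if_pos h, if_neg hne, List.map_map]
    rfl
  · rw [if_neg h, pv_not_any item h]
    simp

-- ===== VERDICT (by name: the statement is the Claim_ definition above) =====
theorem matched_spec : Claim_equal_matched := by
  intro debit_tups ref_tups _ _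
  show matched debit_tups ref_tups = matched_alt debit_tups ref_tups
  simp only [matched, matched_alt]
  rw [pv_A_flat ref_tups debit_tups [], pv_hits debit_tups ref_tups (fun _ => ([] : List String)),
      pv_zip_map, pv_foldl_app]
  simp only [List.nil_append, List.flatMap_map]
  congr 1
  funext item
  simpa [pvBlockB] using pv_block ref_tups item
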